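-- pv_equiv track=rewrite | github.com/rhishmapandey/Sim8085 | emu.py | misc_getele
-- ===== SOURCE A (Python) =====
-- def misc_getele(line:str) -> list:
--     nws = line.split()
--     ret = []
--     if (nws == []):
--         return ret
--     for l in nws:
--         start = 0
--         for i in range(len(l)):
--             if (l[i] == ','):
--                 if (start < i):
--                     ret.append(l[start:i])
--                 ret.append(',')
--                 start = i+1
--             elif (l[i] == ':'):
--                 if (start < i):
--                     ret.append(l[start:i])
--                 ret.append(':')
--                 start = i+1
--         if (start < len(l)):
--             ret.append(l[start:i+1])
--     return ret
-- ===== SOURCE B (Python) =====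
-- def misc_getele(line: str) -> list:
--     # Pad separators with spaces, then let whitespace-split do all the tokenizing.
--     return line.replace(',', ' , ').replace(':', ' : ').split()
-- ===== Notes on version B (the rewrite author's own statement) =====
-- stated objective: simpler
-- what changed: Replaced the nested index-scanning loops with slice bookkeeping by a pipeline that pads each separator character (comma and colon) with spaces and tokenizes with a single whitespace split.
import Mathlib
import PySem

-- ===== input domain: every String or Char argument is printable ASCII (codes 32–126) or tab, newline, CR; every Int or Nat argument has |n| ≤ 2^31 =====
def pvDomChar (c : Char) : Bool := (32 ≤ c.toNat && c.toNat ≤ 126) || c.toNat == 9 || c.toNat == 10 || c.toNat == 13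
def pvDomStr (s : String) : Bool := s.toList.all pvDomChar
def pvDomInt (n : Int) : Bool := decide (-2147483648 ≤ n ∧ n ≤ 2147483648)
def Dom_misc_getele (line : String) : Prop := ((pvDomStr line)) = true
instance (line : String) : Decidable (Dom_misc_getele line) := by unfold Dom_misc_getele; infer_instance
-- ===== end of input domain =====

-- B replaces A's nested index-scanning loops by padding each separator (comma, colon) with spaces and doing one whitespace split (simpler pipeline, same tokens).


-- ===== PORT A =====
-- body of 'for i in range(len(l))' with state (start, ret); l[i] via pyGet? (i is always in range here)
def pvStepA (w : List Char) (st : Nat × List String) (i : Nat) : Nat × List String :=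
  match PySem.List.pyGet? w (i : Int) with
  | some c =>
    if c = ',' then
      (i + 1, (if st.1 < i then st.2 ++ [String.ofList (PySem.List.slice w (some (st.1 : Int)) (some (i : Int)))] else st.2) ++ [","])
    else if c = ':' then
      (i + 1, (if st.1 < i then st.2 ++ [String.ofList (PySem.List.slice w (some (st.1 : Int)) (some (i : Int)))] else st.2) ++ [":"])
    else st
  | none => st  -- unreachable: every i from range(len(l)) is in range

-- one iteration of 'for l in nws'; after the loop the Python variable i equals len(l)-1,
-- so the trailing l[start:i+1] is l[start:len(l)] (split() yields only nonempty words, so the inner loop always ran)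
def pvWordA (ret : List String) (l : String) : List String :=
  let w := l.toList
  let n := w.length
  let st := (List.range n).foldl (pvStepA w) (0, ret)
  if st.1 < n then st.2 ++ [String.ofList (PySem.List.slice w (some (st.1 : Int)) (some (n : Int)))] else st.2

def misc_getele (line : String) : List String :=
  let nws := PySem.Str.split₀ line
  if nws = [] then [] else nws.foldl pvWordA []

-- ===== PORT B =====
def misc_getele_alt (line : String) : List String :=
  PySem.Str.split₀ (PySem.Str.replace (PySem.Str.replace line "," " , ") ":" " : ")

-- ===== PRECONDITION & SPEC =====
def Spec_misc_getele (line : String) (out : List String) : Prop := out = misc_getele_alt line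
instance (line : String) (out : List String) : Decidable (Spec_misc_getele line out) := by unfold Spec_misc_getele; infer_instance

-- ===== CLAIM (what is proved, stated in full; the proofs are below) =====
def Claim_equal_misc_getele : Prop := ∀ (line : String), Dom_misc_getele line → Spec_misc_getele line (misc_getele line)

-- ===== LEMMAS AND PROOFS =====

-- separators A splits at
def pvSep (c : Char) : Bool := c == ',' || c == ':'

-- emit the pending (reversed) token, if any
def pvFlush (cur : List Char) : List (List Char) := if cur = [] then [] else [cur.reverse]

-- canonical tokenizer: both ports are proved equal to (pvTok line.toList []).map String.ofList
def pvTok : List Char → List Char → List (List Char)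
  | [], cur => pvFlush cur
  | c :: r, cur =>
    if PySem.Chars.isspace c then pvFlush cur ++ pvTok r []
    else if pvSep c then pvFlush cur ++ [[c]] ++ pvTok r []
    else pvTok r (c :: cur)

-- split₀ with each produced word re-split at separators (mirror of split₀.go)
def pvQ : List Char → List Char → List (List Char)
  | [], cur => pvTok cur.reverse []
  | c :: r, cur =>
    if PySem.Chars.isspace c then pvTok cur.reverse [] ++ pvQ r [] else pvQ r (c :: cur)

-- character padding performed by B's two replaces combined
def pvPad (c : Char) : List Char :=
  if c = ',' then [' ', ',', ' '] else if c = ':' then [' ', ':', ' '] else [c]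

theorem pvGoNil (cur : List Char) (acc : List (List Char)) :
    PySem.Chars.split₀.go [] cur acc = acc.reverse ++ pvFlush cur := by
  by_cases h : cur = [] <;> simp [PySem.Chars.split₀.go, pvFlush, h]

theorem pvGoFlush (r cur : List Char) (acc : List (List Char)) (c : Char)
    (hc : PySem.Chars.isspace c = true) :
    PySem.Chars.split₀.go (c :: r) cur acc =
      PySem.Chars.split₀.go r [] ((pvFlush cur).reverse ++ acc) := by
  by_cases h : cur = [] <;> simp [PySem.Chars.split₀.go, hc, pvFlush, h]

theorem pvGoPlain (r cur : List Char) (acc : List (List Char)) (c : Char)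
    (hc : PySem.Chars.isspace c = false) :
    PySem.Chars.split₀.go (c :: r) cur acc = PySem.Chars.split₀.go r (c :: cur) acc := by
  simp [PySem.Chars.split₀.go, hc]

theorem pvB_main : ∀ (s cur : List Char) (acc : List (List Char)),
    PySem.Chars.split₀.go (s.flatMap pvPad) cur acc = acc.reverse ++ pvTok s cur := by
  intro s
  induction s with
  | nil => intro cur acc; simpa [pvTok] using pvGoNil cur acc
  | cons c r ih =>
    intro cur acc
    by_cases hc : c = ','
    · subst hc
      rw [show ((',' :: r).flatMap pvPad) = ' ' :: ',' :: ' ' :: r.flatMap pvPad by simp [pvPad]]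
      rw [pvGoFlush _ _ _ _ (by decide), pvGoPlain _ _ _ _ (by decide),
        pvGoFlush _ _ _ _ (by decide), ih]
      simp [pvTok, pvSep, pvFlush, (by decide : PySem.Chars.isspace ',' = false)]
    · by_cases hc2 : c = ':'
      · subst hc2
        rw [show ((':' :: r).flatMap pvPad) = ' ' :: ':' :: ' ' :: r.flatMap pvPad by simp [pvPad]]
        rw [pvGoFlush _ _ _ _ (by decide), pvGoPlain _ _ _ _ (by decide),
          pvGoFlush _ _ _ _ (by decide), ih]
        simp [pvTok, pvSep, pvFlush, (by decide : PySem.Chars.isspace ':' = false)]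
      · rw [show ((c :: r).flatMap pvPad) = c :: r.flatMap pvPad by simp [pvPad, hc, hc2]]
        by_cases hws : PySem.Chars.isspace c = true
        · rw [pvGoFlush _ _ _ _ hws, ih]
          simp [pvTok, hws, pvFlush]
        · rw [pvGoPlain _ _ _ _ (by simpa using hws), ih]
          simp [pvTok, hws, pvSep, hc, hc2]

theorem pvP_main : ∀ (s cur : List Char) (acc : List (List Char)),
    (PySem.Chars.split₀.go s cur acc).flatMap (fun w => pvTok w []) =
      acc.reverse.flatMap (fun w => pvTok w []) ++ pvQ s cur := by
  intro s
  induction s with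
  | nil =>
    intro cur acc
    rw [pvGoNil]
    by_cases h : cur = [] <;> simp [pvFlush, h, pvQ, pvTok]
  | cons c r ih =>
    intro cur acc
    by_cases hws : PySem.Chars.isspace c = true
    · rw [pvGoFlush _ _ _ _ hws, ih]
      by_cases h : cur = [] <;> simp [pvFlush, h, pvQ, hws, pvTok]
    · rw [pvGoPlain _ _ _ _ (by simpa using hws), ih]
      simp [pvQ, hws]

theorem pvTok_plain_prefix : ∀ (x : List Char) (y cur : List Char),
    (∀ c ∈ x, PySem.Chars.isspace c = false ∧ pvSep c = false) →
    pvTok (x ++ y) cur = pvTok y (x.reverse ++ cur) := by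
  intro x
  induction x with
  | nil => intro y cur _; simp
  | cons c r ih =>
    intro y cur h
    have hc := h c (by simp)
    simp only [List.cons_append]
    rw [pvTok, if_neg (by simp [hc.1]), if_neg (by simp [hc.2]),
      ih y (c :: cur) (fun d hd => h d (by simp [hd]))]
    simp

theorem pvTok_plain (x cur : List Char)
    (h : ∀ c ∈ x, PySem.Chars.isspace c = false ∧ pvSep c = false) :
    pvTok x cur = pvFlush (x.reverse ++ cur) := by
  have := pvTok_plain_prefix x [] cur h
  simpa [pvTok] using this

theorem pvTok_append : ∀ (p : List Char) (cur y : List Char),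
    (∀ c ∈ p, PySem.Chars.isspace c = false) →
    ((∃ q e, pvSep e = true ∧ p = q ++ [e]) ∨ (p = [] ∧ cur = [])) →
    pvTok (p ++ y) cur = pvTok p cur ++ pvTok y [] := by
  intro p
  induction p with
  | nil =>
    intro cur y _ h
    rcases h with ⟨q, e, _, hqe⟩ | ⟨_, hcur⟩
    · exact absurd hqe (by simp)
    · subst hcur; simp [pvTok, pvFlush]
  | cons a p' ih =>
    intro cur y hws h
    rcases h with ⟨q, e, he, hqe⟩ | ⟨hp, _⟩
    · have ha := hws a (by simp)
      by_cases hp' : p' = []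
      · subst hp'
        have : a = e := by
          cases q with
          | nil => simpa using congrArg (fun l => l.headD ' ') hqe
          | cons x t => simp at hqe
        subst this
        simp only [List.cons_append, List.nil_append]
        rw [pvTok, if_neg (by simp [ha]), if_pos he]
        rw [pvTok, if_neg (by simp [ha]), if_pos he]
        simp [pvTok, pvFlush]
      · have hsplit : ∃ q' , p' = q' ++ [e] := by
          cases q with
          | nil => simp at hqe; exact absurd hqe.2 hp'
          | cons x t => simp at hqe; exact ⟨t, hqe.2⟩
        rcases hsplit with ⟨q', hq'⟩
        by_cases hsa : pvSep a = true
        · simp only [List.cons_append]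
          rw [pvTok, if_neg (by simp [ha]), if_pos hsa]
          rw [pvTok, if_neg (by simp [ha]), if_pos hsa]
          rw [ih [] y (fun d hd => hws d (by simp [hd])) (Or.inl ⟨q', e, he, hq'⟩)]
          simp
        · simp only [List.cons_append]
          rw [pvTok, if_neg (by simp [ha]), if_neg hsa]
          rw [pvTok, if_neg (by simp [ha]), if_neg hsa]
          exact ih (a :: cur) y (fun d hd => hws d (by simp [hd])) (Or.inl ⟨q', e, he, hq'⟩)
    · exact absurd hp (by simp)

theorem pvTok_snoc_sep (d : List Char) (c : Char)
    (hd : ∀ e ∈ d, PySem.Chars.isspace e = false ∧ pvSep e = false)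
    (hws : PySem.Chars.isspace c = false) (hsc : pvSep c = true) :
    pvTok (d ++ [c]) [] = pvFlush d.reverse ++ [[c]] := by
  rw [pvTok_plain_prefix d [c] [] hd]
  rw [pvTok, if_neg (by simp [hws]), if_pos hsc]
  simp [pvTok, pvFlush]

theorem pvQ_eq_tok : ∀ (s p d : List Char),
    (∀ c ∈ p, PySem.Chars.isspace c = false) →
    (∀ c ∈ d, PySem.Chars.isspace c = false ∧ pvSep c = false) →
    ((∃ q e, pvSep e = true ∧ p = q ++ [e]) ∨ p = []) →
    pvQ s ((p ++ d).reverse) = pvTok p [] ++ pvTok s d.reverse := by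
  intro s
  induction s with
  | nil =>
    intro p d hp hd hsep
    rw [pvQ]
    simp only [List.reverse_reverse]
    rw [pvTok_append p [] d hp (by rcases hsep with h | h; exact Or.inl h; exact Or.inr ⟨h, rfl⟩)]
    rw [pvTok_plain d [] hd]
    simp [pvTok]
  | cons c r ih =>
    intro p d hp hd hsep
    by_cases hws : PySem.Chars.isspace c = true
    · rw [pvQ, if_pos hws]
      simp only [List.reverse_reverse]
      rw [pvTok_append p [] d hp (by rcases hsep with h | h; exact Or.inl h; exact Or.inr ⟨h, rfl⟩)]
      rw [pvTok_plain d [] hd]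
      have h2 := ih [] [] (by simp) (by simp) (Or.inr rfl)
      simp only [List.nil_append, List.reverse_nil, pvTok, pvFlush, if_pos] at h2
      rw [h2]
      conv_rhs => rw [pvTok]
      rw [if_pos hws]
      simp [pvFlush]
    · have hws' : PySem.Chars.isspace c = false := by simpa using hws
      by_cases hsc : pvSep c = true
      · rw [pvQ, if_neg (by simp [hws'])]
        have hre : c :: (p ++ d).reverse = ((p ++ (d ++ [c])) ++ []).reverse := by simp
        rw [hre]
        have hrec := ih (p ++ (d ++ [c])) []
          (by intro e he
              rcases List.mem_append.mp he with h1 | h2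
              · exact hp e h1
              · rcases List.mem_append.mp h2 with h3 | h4
                · exact (hd e h3).1
                · simp at h4; subst h4; exact hws')
          (by simp)
          (Or.inl ⟨p ++ d, c, hsc, by simp⟩)
        rw [hrec]
        rw [pvTok_append p [] (d ++ [c]) hp (by rcases hsep with h | h; exact Or.inl h; exact Or.inr ⟨h, rfl⟩)]
        rw [pvTok_snoc_sep d c hd hws' hsc]
        rw [pvTok, if_neg (by simp [hws']), if_pos hsc]
        simp
      · rw [pvQ, if_neg (by simp [hws'])]
        have hre : c :: (p ++ d).reverse = (p ++ (d ++ [c])).reverse := by simp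
        rw [hre]
        rw [ih p (d ++ [c]) hp
          (by intro e he
              rcases List.mem_append.mp he with h1 | h2
              · exact hd e h1
              · simp at h2; subst h2; exact ⟨hws', by simpa using hsc⟩)
          hsep]
        rw [pvTok, if_neg (by simp [hws']), if_neg hsc]
        simp

-- A-side loop invariant
theorem pvInv (w : List Char) (hw : ∀ c ∈ w, PySem.Chars.isspace c = false) (r0 : List String) :
    ∀ (j : Nat), j ≤ w.length →
      ((List.range j).foldl (pvStepA w) (0, r0)).1 ≤ j ∧
      ((List.range j).foldl (pvStepA w) (0, r0)).2 ++
        (pvTok (w.drop j) (((w.take j).drop ((List.range j).foldl (pvStepA w) (0, r0)).1).reverse)).map String.ofList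
        = r0 ++ (pvTok w []).map String.ofList := by
  intro j
  induction j with
  | zero => exact fun _ => ⟨le_rfl, by simp⟩
  | succ j ih =>
    intro hj1
    have hj : j < w.length := hj1
    obtain ⟨h1, h2⟩ := ih (Nat.le_of_lt hj)
    rw [List.range_succ, List.foldl_append, List.foldl_cons, List.foldl_nil]
    set st := (List.range j).foldl (pvStepA w) (0, r0) with hst
    have hget : PySem.List.pyGet? w (j : Int) = some w[j] := by simp [pysem, hj]
    have hdropj : w.drop j = w[j] :: w.drop (j + 1) := List.drop_eq_getElem_cons hj
    have htakej : w.take (j + 1) = w.take j ++ [w[j]] := by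
      rw [List.take_add_one, List.getElem?_eq_getElem hj]; rfl
    have hlen : (w.take j).length = j := by simp [Nat.le_of_lt hj]
    have hsl : PySem.List.slice w (some (st.1 : Int)) (some (j : Int)) = (w.take j).drop st.1 := by
      simp [pysem, List.drop_take]
    have hwj : PySem.Chars.isspace w[j] = false := hw w[j] (List.getElem_mem hj)
    have hpe : ((w.take j).drop st.1 = [] ↔ j ≤ st.1) := by
      rw [List.drop_eq_nil_iff, hlen]
    have hd2 : (w.take (j + 1)).drop (j + 1) = [] := by
      rw [List.drop_eq_nil_iff, List.length_take]; omega
    by_cases hc : w[j] = ','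
    · have hstep : pvStepA w st j = (j + 1,
          (if st.1 < j then st.2 ++ [String.ofList (PySem.List.slice w (some (st.1 : Int)) (some (j : Int)))] else st.2) ++ [","]) := by
        simp [pvStepA, hget, hc]
      rw [hstep]
      refine ⟨le_rfl, ?_⟩
      dsimp only
      rw [hd2]
      rw [hdropj, hc] at h2
      rw [pvTok, if_neg (by decide), if_pos (by decide)] at h2
      by_cases hlt : st.1 < j
      · have hne : ((w.take j).drop st.1).reverse ≠ [] := by
          simp only [ne_eq, List.reverse_eq_nil_iff, hpe]; omega
        rw [if_pos hlt, hsl]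
        rw [show pvFlush ((w.take j).drop st.1).reverse = [(w.take j).drop st.1] by
          simp [pvFlush, hne]] at h2
        rw [← h2]
        simp
      · have hnil : (w.take j).drop st.1 = [] := hpe.mpr (by omega)
        rw [if_neg hlt]
        rw [hnil] at h2
        rw [show pvFlush (([] : List Char)).reverse = [] by simp [pvFlush]] at h2
        rw [← h2]
        simp
    · by_cases hc2 : w[j] = ':'
      · have hstep : pvStepA w st j = (j + 1,
            (if st.1 < j then st.2 ++ [String.ofList (PySem.List.slice w (some (st.1 : Int)) (some (j : Int)))] else st.2) ++ [":"]) := by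
          simp [pvStepA, hget, hc2]
        rw [hstep]
        refine ⟨le_rfl, ?_⟩
        dsimp only
        rw [hd2]
        rw [hdropj, hc2] at h2
        rw [pvTok, if_neg (by decide), if_pos (by decide)] at h2
        by_cases hlt : st.1 < j
        · have hne : ((w.take j).drop st.1).reverse ≠ [] := by
            simp only [ne_eq, List.reverse_eq_nil_iff, hpe]; omega
          rw [if_pos hlt, hsl]
          rw [show pvFlush ((w.take j).drop st.1).reverse = [(w.take j).drop st.1] by
            simp [pvFlush, hne]] at h2
          rw [← h2]
          simp
        · have hnil : (w.take j).drop st.1 = [] := hpe.mpr (by omega)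
          rw [if_neg hlt]
          rw [hnil] at h2
          rw [show pvFlush (([] : List Char)).reverse = [] by simp [pvFlush]] at h2
          rw [← h2]
          simp
      · have hstep : pvStepA w st j = st := by
          simp [pvStepA, hget, hc, hc2]
        rw [hstep]
        refine ⟨Nat.le_succ_of_le h1, ?_⟩
        rw [htakej, List.drop_append_of_le_length (by omega)]
        rw [hdropj] at h2
        rw [pvTok, if_neg (by simp [hwj]), if_neg (by simp [pvSep, hc, hc2])] at h2
        rw [← h2]
        simp

theorem pvWordA_eq (w : List Char) (hw : ∀ c ∈ w, PySem.Chars.isspace c = false) (r0 : List String) :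
    pvWordA r0 (String.ofList w) = r0 ++ (pvTok w []).map String.ofList := by
  obtain ⟨h1, h2⟩ := pvInv w hw r0 w.length le_rfl
  rw [List.take_length, List.drop_length] at h2
  simp only [pvTok] at h2
  unfold pvWordA
  simp only [String.toList_ofList]
  set st := (List.range w.length).foldl (pvStepA w) (0, r0) with hst
  have hsl : PySem.List.slice w (some (st.1 : Int)) (some (w.length : Int)) = w.drop st.1 := by
    simp [pysem]
  by_cases hlt : st.1 < w.length
  · rw [if_pos hlt, hsl]
    have hne : (w.drop st.1).reverse ≠ [] := by
      simp only [ne_eq, List.reverse_eq_nil_iff, List.drop_eq_nil_iff]; omega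
    rw [show pvFlush (w.drop st.1).reverse = [w.drop st.1] by simp [pvFlush, hne]] at h2
    rw [← h2]; simp
  · rw [if_neg hlt]
    have hnil : w.drop st.1 = [] := List.drop_eq_nil_iff.mpr (by omega)
    rw [hnil] at h2
    rw [show pvFlush (([] : List Char)).reverse = [] by simp [pvFlush]] at h2
    rw [← h2]; simp

theorem pvSplit_ws_free : ∀ (s cur : List Char) (acc : List (List Char)),
    (∀ c ∈ cur, PySem.Chars.isspace c = false) →
    (∀ w ∈ acc, ∀ c ∈ w, PySem.Chars.isspace c = false) →
    ∀ w ∈ PySem.Chars.split₀.go s cur acc, ∀ c ∈ w, PySem.Chars.isspace c = false := by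
  intro s
  induction s with
  | nil =>
    intro cur acc hcur hacc w hw c hc
    rw [pvGoNil] at hw
    rcases List.mem_append.mp hw with h | h
    · exact hacc w (List.mem_reverse.mp h) c hc
    · by_cases hn : cur = []
      · simp [pvFlush, hn] at h
      · simp only [pvFlush, if_neg hn, List.mem_singleton] at h
        subst h
        exact hcur c (List.mem_reverse.mp hc)
  | cons a r ih =>
    intro cur acc hcur hacc w hw c hc
    by_cases hws : PySem.Chars.isspace a = true
    · rw [pvGoFlush _ _ _ _ hws] at hw
      refine ih [] _ (by simp) ?_ w hw c hc
      intro v hv d hd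
      rcases List.mem_append.mp hv with h | h
      · by_cases hn : cur = []
        · simp [pvFlush, hn] at h
        · simp only [pvFlush, if_neg hn, List.reverse_cons, List.reverse_nil,
            List.nil_append, List.mem_singleton] at h
          subst h
          exact hcur d (List.mem_reverse.mp hd)
      · exact hacc v h d hd
    · rw [pvGoPlain _ _ _ _ (by simpa using hws)] at hw
      refine ih (a :: cur) acc ?_ hacc w hw c hc
      intro d hd
      rcases List.mem_cons.mp hd with h | h
      · subst h; simpa using hws
      · exact hcur d h

theorem pvFold_words : ∀ (WS : List (List Char)) (r0 : List String),
    (∀ w ∈ WS, ∀ c ∈ w, PySem.Chars.isspace c = false) →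
    (WS.map String.ofList).foldl pvWordA r0 =
      r0 ++ (WS.flatMap (fun w => pvTok w [])).map String.ofList := by
  intro WS
  induction WS with
  | nil => intro r0 _; simp
  | cons w ws ih =>
    intro r0 h
    simp only [List.map_cons, List.foldl_cons]
    rw [pvWordA_eq w (h w (by simp)) r0, ih _ (fun v hv => h v (by simp [hv]))]
    simp

-- B's two single-character replaces compose to pvPad
theorem pvPad_eq (x : Char) :
    (if x = ',' then [' ', ',', ' '] else [x]).flatMap
      (fun y => if y = ':' then [' ', ':', ' '] else [y]) = pvPad x := by
  by_cases h1 : x = ','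
  · subst h1; decide
  · by_cases h2 : x = ':'
    · subst h2; decide
    · simp [pvPad, h1, h2]

-- single-character replace is a flatMap
theorem pvReplaceGo_single (c : Char) (new : List Char) :
    ∀ (fuel : Nat) (s : List Char) (acc : List Char), s.length ≤ fuel →
      PySem.Chars.replace.go [c] new fuel s acc =
        acc.reverse ++ s.flatMap (fun x => if x = c then new else [x]) := by
  intro fuel
  induction fuel with
  | zero => intro s acc h; simp at h; simp [h, PySem.Chars.replace.go]
  | succ n ih =>
    intro s acc h
    cases s with
    | nil => simp [PySem.Chars.replace.go]
    | cons x t =>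
      simp only [PySem.Chars.replace.go]
      by_cases hx : x = c
      · subst hx
        have : List.isPrefixOf [x] (x :: t) = true := by simp [List.isPrefixOf]
        simp only [this, if_pos]
        rw [ih]
        · simp
        · simpa using Nat.le_of_succ_le_succ h
      · have : List.isPrefixOf [c] (x :: t) = false := by
          simp [List.isPrefixOf]
          intro hc; exact absurd hc.symm hx
        simp only [this]
        rw [ih t (x :: acc) (by simpa using Nat.le_of_succ_le_succ h)]
        simp [hx]

theorem pvReplace_single (s : List Char) (c : Char) (new : List Char) :
    PySem.Chars.replace s [c] new = s.flatMap (fun x => if x = c then new else [x]) := by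
  simp [PySem.Chars.replace]
  rw [pvReplaceGo_single]
  · simp
  · exact le_rfl

-- both ports compute the canonical tokens
theorem pvB_tok (line : String) :
    misc_getele_alt line = (pvTok line.toList []).map String.ofList := by
  have h1 : (PySem.Str.replace line "," " , ").toList =
      line.toList.flatMap (fun x => if x = ',' then [' ', ',', ' '] else [x]) := by
    rw [PySem.Str.toList_replace,
      show (",").toList = [','] by decide, show (" , ").toList = [' ', ',', ' '] by decide]
    exact pvReplace_single _ _ _
  have h2 : (PySem.Str.replace (PySem.Str.replace line "," " , ") ":" " : ").toList =
      line.toList.flatMap pvPad := by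
    rw [PySem.Str.toList_replace,
      show (":").toList = [':'] by decide, show (" : ").toList = [' ', ':', ' '] by decide]
    rw [pvReplace_single, h1, List.flatMap_assoc]
    rw [show (fun x => List.flatMap (fun y => if y = ':' then [' ', ':', ' '] else [y])
        (if x = ',' then [' ', ',', ' '] else [x])) = pvPad from funext pvPad_eq]
  unfold misc_getele_alt
  rw [PySem.Str.split₀, h2, PySem.Chars.split₀, pvB_main]
  simp

theorem pvA_tok (line : String) :
    misc_getele line = (pvTok line.toList []).map String.ofList := by
  have hQ : pvQ line.toList [] = pvTok line.toList [] := by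
    have := pvQ_eq_tok line.toList [] [] (by simp) (by simp) (Or.inr rfl)
    simpa [pvTok] using this
  have hflat : (PySem.Chars.split₀ line.toList).flatMap (fun w => pvTok w []) =
      pvTok line.toList [] := by
    rw [PySem.Chars.split₀, pvP_main]
    simpa using hQ
  unfold misc_getele
  by_cases hnil : PySem.Str.split₀ line = []
  · rw [if_pos hnil]
    have : PySem.Chars.split₀ line.toList = [] := by
      have := hnil
      rw [PySem.Str.split₀] at this
      simpa using this
    rw [← hflat, this]
    simp
  · rw [if_neg hnil]
    rw [PySem.Str.split₀, PySem.Chars.split₀]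
    rw [pvFold_words _ _ (pvSplit_ws_free line.toList [] [] (by simp) (by simp))]
    rw [← PySem.Chars.split₀, hflat]
    simp

-- ===== VERDICT (by name: the statement is the Claim_ definition above) =====
theorem misc_getele_spec : Claim_equal_misc_getele := by
  intro line _
  unfold Spec_misc_getele
  rw [pvA_tok, pvB_tok]
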